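-- pv_equiv track=rewrite | github.com/getsentry/sentry-godot | site_scons/site_tools/plist.py | _framework_plist_content
-- ===== SOURCE A (Python) =====
-- def _framework_plist_content(
--     bundle_executable,
--     bundle_identifier=None,
--     bundle_name=None,
--     bundle_version="1.0",
--     bundle_platforms=None,
--     bundle_package_type="FMWK",
--     min_os_version=None,
-- ):
--     """Generate Info.plist content string for a framework bundle."""
--     if bundle_identifier is None:
--         bundle_identifier = f"com.example.{bundle_executable}"
--     if bundle_name is None:
--         bundle_name = bundle_executable
--     if bundle_platforms is None:
--         bundle_platforms = ["MacOSX"]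
--
--     short_version = bundle_version.split("-", 1)[0]
--     platforms_content = "\n".join(f"\t\t<string>{p}</string>" for p in bundle_platforms)
--
--     # Use the appropriate minimum version key for the platform.
--     is_ios = any(p in ("iPhoneOS", "iPhoneSimulator") for p in bundle_platforms)
--     min_version_key = "MinimumOSVersion" if is_ios else "LSMinimumSystemVersion"
--     min_version_entry = ""
--     if min_os_version:
--         min_version_entry = (
--             f"\t<key>{min_version_key}</key>\n"
--             f"\t<string>{min_os_version}</string>\n"
--         )
--
--     return f"""\
-- <?xml version="1.0" encoding="UTF-8"?>
-- <!DOCTYPE plist PUBLIC "-//Apple//DTD PLIST 1.0//EN" "http://www.apple.com/DTDs/PropertyList-1.0.dtd">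
-- <plist version="1.0">
-- <dict>
-- \t<key>CFBundleExecutable</key>
-- \t<string>{bundle_executable}</string>
-- \t<key>CFBundleIdentifier</key>
-- \t<string>{bundle_identifier}</string>
-- \t<key>CFBundleInfoDictionaryVersion</key>
-- \t<string>6.0</string>
-- \t<key>CFBundleName</key>
-- \t<string>{bundle_name}</string>
-- \t<key>CFBundlePackageType</key>
-- \t<string>{bundle_package_type}</string>
-- \t<key>CFBundleShortVersionString</key>
-- \t<string>{bundle_version}</string>
-- \t<key>CFBundleSupportedPlatforms</key>
-- \t<array>
-- {platforms_content}
-- \t</array>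
-- \t<key>CFBundleVersion</key>
-- \t<string>{short_version}</string>
-- {min_version_entry}\
-- </dict>
-- </plist>
-- """
-- ===== SOURCE B (Python) =====
-- def _framework_plist_content(
--     bundle_executable,
--     bundle_identifier=None,
--     bundle_name=None,
--     bundle_version="1.0",
--     bundle_platforms=None,
--     bundle_package_type="FMWK",
--     min_os_version=None,
-- ):
--     """Generate Info.plist content string for a framework bundle."""
--     ident = bundle_identifier if bundle_identifier is not None else "com.example." + bundle_executable
--     name = bundle_name if bundle_name is not None else bundle_executable
--     platforms = bundle_platforms if bundle_platforms is not None else ["MacOSX"]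
--     ios = any(p == "iPhoneOS" or p == "iPhoneSimulator" for p in platforms)
--
--     lines = []
--     for key, value in [
--         ("CFBundleExecutable", bundle_executable),
--         ("CFBundleIdentifier", ident),
--         ("CFBundleInfoDictionaryVersion", "6.0"),
--         ("CFBundleName", name),
--         ("CFBundlePackageType", bundle_package_type),
--         ("CFBundleShortVersionString", bundle_version),
--     ]:
--         lines.append("\t<key>%s</key>" % key)
--         lines.append("\t<string>%s</string>" % value)
--     lines.append("\t<key>CFBundleSupportedPlatforms</key>")
--     lines.append("\t<array>")
--     lines.append("\n".join("\t\t<string>%s</string>" % p for p in platforms))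
--     lines.append("\t</array>")
--     lines.append("\t<key>CFBundleVersion</key>")
--     lines.append("\t<string>%s</string>" % bundle_version.split("-", 1)[0])
--     if min_os_version:
--         lines.append("\t<key>%s</key>" % ("MinimumOSVersion" if ios else "LSMinimumSystemVersion"))
--         lines.append("\t<string>%s</string>" % min_os_version)
--
--     header = (
--         '<?xml version="1.0" encoding="UTF-8"?>\n'
--         '<!DOCTYPE plist PUBLIC "-//Apple//DTD PLIST 1.0//EN" "http://www.apple.com/DTDs/PropertyList-1.0.dtd">\n'
--         '<plist version="1.0">\n'
--         '<dict>\n'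
--     )
--     return header + "\n".join(lines) + "\n</dict>\n</plist>\n"
-- ===== Notes on version B (the rewrite author's own statement) =====
-- stated objective: simpler
-- what changed: B replaces A's single giant f-string template with a table-driven builder: an ordered list of (key, value) pairs emitted as lines by one loop, the platforms <array> block and the optional min-version entry appended to the line list, then one join between a fixed header and footer.
import Mathlib
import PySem

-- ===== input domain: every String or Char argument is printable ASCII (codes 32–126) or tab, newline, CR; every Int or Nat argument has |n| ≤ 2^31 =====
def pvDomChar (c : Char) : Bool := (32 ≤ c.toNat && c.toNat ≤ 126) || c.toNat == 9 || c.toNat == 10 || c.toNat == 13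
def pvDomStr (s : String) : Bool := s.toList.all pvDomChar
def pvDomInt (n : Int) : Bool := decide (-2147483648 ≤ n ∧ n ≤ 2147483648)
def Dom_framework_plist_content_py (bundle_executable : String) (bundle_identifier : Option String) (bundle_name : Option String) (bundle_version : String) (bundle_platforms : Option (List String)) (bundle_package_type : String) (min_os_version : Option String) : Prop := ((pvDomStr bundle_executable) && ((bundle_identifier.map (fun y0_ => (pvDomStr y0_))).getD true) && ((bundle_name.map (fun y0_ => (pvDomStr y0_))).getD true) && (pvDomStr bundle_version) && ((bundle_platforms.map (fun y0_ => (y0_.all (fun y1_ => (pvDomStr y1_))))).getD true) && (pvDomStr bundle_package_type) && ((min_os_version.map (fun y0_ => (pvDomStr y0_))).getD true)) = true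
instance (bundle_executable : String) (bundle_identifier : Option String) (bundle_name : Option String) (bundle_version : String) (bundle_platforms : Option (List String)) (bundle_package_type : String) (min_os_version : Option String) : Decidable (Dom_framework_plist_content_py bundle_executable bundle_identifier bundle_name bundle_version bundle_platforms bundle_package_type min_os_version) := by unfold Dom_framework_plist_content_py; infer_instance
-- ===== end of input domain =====

-- B builds the dict body as a list of lines (scalar <key>/<string> pairs emitted by a loop over
-- an ordered pair table, the platforms <array> block and the optional min-version entry appended
-- in place) and joins them once; objective: simpler decomposition, same cost.
-- ===== PORT A =====
def framework_plist_content_py (bundle_executable : String) (bundle_identifier : Option String) (bundle_name : Option String) (bundle_version : String) (bundle_platforms : Option (List String)) (bundle_package_type : String) (min_os_version : Option String) : String :=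
  let bundle_identifier : String := match bundle_identifier with
    | none => "com.example." ++ bundle_executable
    | some s => s
  let bundle_name : String := match bundle_name with
    | none => bundle_executable
    | some s => s
  let bundle_platforms : List String := match bundle_platforms with
    | none => ["MacOSX"]
    | some l => l
  -- bundle_version.split("-", 1)[0]; split with nonempty sep always returns a nonempty list, so [0] is its head
  let short_version : String := String.ofList ((PySem.Chars.splitOnMax bundle_version.toList ['-'] 1).headD [])
  let platforms_content : String := PySem.Str.join "\n" (bundle_platforms.map (fun p => "\t\t<string>" ++ p ++ "</string>"))
  let is_ios : Bool := bundle_platforms.any (fun p => p == "iPhoneOS" || p == "iPhoneSimulator")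
  let min_version_key : String := if is_ios then "MinimumOSVersion" else "LSMinimumSystemVersion"
  -- 'if min_os_version:' — truthy iff present and nonempty
  let min_version_entry : String := match min_os_version with
    | none => ""
    | some s => if s == "" then "" else
        "\t<key>" ++ min_version_key ++ "</key>\n" ++ "\t<string>" ++ s ++ "</string>\n"
  "<?xml version=\"1.0\" encoding=\"UTF-8\"?>\n<!DOCTYPE plist PUBLIC \"-//Apple//DTD PLIST 1.0//EN\" \"http://www.apple.com/DTDs/PropertyList-1.0.dtd\">\n<plist version=\"1.0\">\n<dict>\n\t<key>CFBundleExecutable</key>\n\t<string>"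
    ++ bundle_executable ++ "</string>\n\t<key>CFBundleIdentifier</key>\n\t<string>"
    ++ bundle_identifier ++ "</string>\n\t<key>CFBundleInfoDictionaryVersion</key>\n\t<string>6.0</string>\n\t<key>CFBundleName</key>\n\t<string>"
    ++ bundle_name ++ "</string>\n\t<key>CFBundlePackageType</key>\n\t<string>"
    ++ bundle_package_type ++ "</string>\n\t<key>CFBundleShortVersionString</key>\n\t<string>"
    ++ bundle_version ++ "</string>\n\t<key>CFBundleSupportedPlatforms</key>\n\t<array>\n"
    ++ platforms_content ++ "\n\t</array>\n\t<key>CFBundleVersion</key>\n\t<string>"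
    ++ short_version ++ "</string>\n"
    ++ min_version_entry ++ "</dict>\n</plist>\n"

-- ===== PORT B =====
def framework_plist_content_py_alt (bundle_executable : String) (bundle_identifier : Option String) (bundle_name : Option String) (bundle_version : String) (bundle_platforms : Option (List String)) (bundle_package_type : String) (min_os_version : Option String) : String :=
  let ident : String := match bundle_identifier with
    | none => "com.example." ++ bundle_executable
    | some s => s
  let name : String := match bundle_name with
    | none => bundle_executable
    | some s => s
  let platforms : List String := match bundle_platforms with
    | none => ["MacOSX"]
    | some l => l
  let ios : Bool := platforms.any (fun p => p == "iPhoneOS" || p == "iPhoneSimulator")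
  let lines : List String :=
    ([("CFBundleExecutable", bundle_executable),
      ("CFBundleIdentifier", ident),
      ("CFBundleInfoDictionaryVersion", "6.0"),
      ("CFBundleName", name),
      ("CFBundlePackageType", bundle_package_type),
      ("CFBundleShortVersionString", bundle_version)] : List (String × String)).foldl
      (fun acc kv => acc ++ ["\t<key>" ++ kv.1 ++ "</key>", "\t<string>" ++ kv.2 ++ "</string>"]) []
  let lines : List String := lines ++
    ["\t<key>CFBundleSupportedPlatforms</key>", "\t<array>",
     PySem.Str.join "\n" (platforms.map (fun p => "\t\t<string>" ++ p ++ "</string>")),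
     "\t</array>", "\t<key>CFBundleVersion</key>",
     "\t<string>" ++ String.ofList ((PySem.Chars.splitOnMax bundle_version.toList ['-'] 1).headD []) ++ "</string>"]
  let lines : List String := match min_os_version with
    | none => lines
    | some s => if s == "" then lines else lines ++
        ["\t<key>" ++ (if ios then "MinimumOSVersion" else "LSMinimumSystemVersion") ++ "</key>",
         "\t<string>" ++ s ++ "</string>"]
  "<?xml version=\"1.0\" encoding=\"UTF-8\"?>\n<!DOCTYPE plist PUBLIC \"-//Apple//DTD PLIST 1.0//EN\" \"http://www.apple.com/DTDs/PropertyList-1.0.dtd\">\n<plist version=\"1.0\">\n<dict>\n"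
    ++ PySem.Str.join "\n" lines ++ "\n</dict>\n</plist>\n"

-- ===== PRECONDITION & SPEC =====
def Spec_framework_plist_content_py (bundle_executable : String) (bundle_identifier : Option String) (bundle_name : Option String) (bundle_version : String) (bundle_platforms : Option (List String)) (bundle_package_type : String) (min_os_version : Option String) (out : String) : Prop := out = framework_plist_content_py_alt bundle_executable bundle_identifier bundle_name bundle_version bundle_platforms bundle_package_type min_os_version
instance (bundle_executable : String) (bundle_identifier : Option String) (bundle_name : Option String) (bundle_version : String) (bundle_platforms : Option (List String)) (bundle_package_type : String) (min_os_version : Option String) (out : String) : Decidable (Spec_framework_plist_content_py bundle_executable bundle_identifier bundle_name bundle_version bundle_platforms bundle_package_type min_os_version out) := by unfold Spec_framework_plist_content_py; infer_instance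

-- ===== CLAIM (what is proved, stated in full; the proofs are below) =====
def Claim_equal_framework_plist_content_py : Prop := ∀ (bundle_executable : String) (bundle_identifier : Option String) (bundle_name : Option String) (bundle_version : String) (bundle_platforms : Option (List String)) (bundle_package_type : String) (min_os_version : Option String), Dom_framework_plist_content_py bundle_executable bundle_identifier bundle_name bundle_version bundle_platforms bundle_package_type min_os_version → Spec_framework_plist_content_py bundle_executable bundle_identifier bundle_name bundle_version bundle_platforms bundle_package_type min_os_version (framework_plist_content_py bundle_executable bundle_identifier bundle_name bundle_version bundle_platforms bundle_package_type min_os_version)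

-- ===== LEMMAS AND PROOFS =====
set_option maxRecDepth 8000
set_option maxHeartbeats 4000000

-- ===== VERDICT (by name: the statement is the Claim_ definition above) =====
theorem framework_plist_content_py_spec : Claim_equal_framework_plist_content_py := by
  intro be bi bn bv bp bpt mov _
  unfold Spec_framework_plist_content_py framework_plist_content_py framework_plist_content_py_alt
  cases mov with
  | none =>
    apply String.toList_injective
    simp [PySem.Str.toList_join, PySem.Chars.join_cons_cons, List.foldl]
  | some s =>
    by_cases h : s == ""
    · apply String.toList_injective
      simp only [h, if_true]
      simp [PySem.Str.toList_join, PySem.Chars.join_cons_cons, List.foldl]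
    · apply String.toList_injective
      simp only [h]
      simp [PySem.Str.toList_join, PySem.Chars.join_cons_cons, List.foldl]
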